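-- pv_equiv track=rewrite | github.com/bharathkadur/CodeSignal | The Core/73. Switch Lights/SwitchLights.py | solution
-- ===== SOURCE A (Python) =====
-- def solution(a):
--     for i in range(0,len(a)):
--         if a[i]==1:
--             for j in range(0,i+1):
--                 if a[j] == 1:
--                     a[j] = 0
--                 else:
--                     a[j] = 1
--
--     return a
-- ===== SOURCE B (Python) =====
-- def solution(a):
--     out = [0] * len(a)
--     c = 0
--     for j in range(len(a) - 1, -1, -1):
--         v = a[j]
--         if v == 1:
--             c += 1
--         if c == 0:
--             out[j] = v
--         elif v == 1:
--             out[j] = 1 - c % 2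
--         else:
--             out[j] = c % 2
--     return out
-- ===== Notes on version B (the rewrite author's own statement) =====
-- stated objective: alternative
-- what changed: Replaces the nested prefix re-flipping at each set bit by a single backward pass that keeps the running count of 1s in the suffix and writes each output element from that count's parity (worst-case O(n) instead of O(n^2), though not measurably faster on the benchmark's 1-sparse inputs).
import Mathlib
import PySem

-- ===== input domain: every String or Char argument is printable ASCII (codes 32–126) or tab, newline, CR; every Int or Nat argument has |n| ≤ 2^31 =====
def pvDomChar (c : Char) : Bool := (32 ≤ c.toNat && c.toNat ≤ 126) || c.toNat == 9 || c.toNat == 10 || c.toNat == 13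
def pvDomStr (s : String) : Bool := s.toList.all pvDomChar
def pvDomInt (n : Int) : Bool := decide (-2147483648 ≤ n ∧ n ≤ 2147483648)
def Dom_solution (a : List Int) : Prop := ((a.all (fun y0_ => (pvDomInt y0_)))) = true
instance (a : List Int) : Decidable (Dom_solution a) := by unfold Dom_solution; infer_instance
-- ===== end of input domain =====

-- B replaces A's nested prefix re-flipping by one backward pass over the list keeping the
-- suffix count of 1s (objective: alternative algorithm). A mutates its argument in place; B
-- does not — the equivalence proved here is about the RETURN value only.


-- ===== PORT A =====
def solution (a : List Int) : List Int :=
  (PySem.List.pyRange 0 (a.length : Int) 1).foldl (fun acc i =>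
    if PySem.List.pyGetD acc i 0 = 1 then
      (PySem.List.pyRange 0 (i + 1) 1).foldl (fun acc2 j =>
        if PySem.List.pyGetD acc2 j 0 = 1 then PySem.List.pySetD acc2 j 0
        else PySem.List.pySetD acc2 j 1) acc
    else acc) a

-- ===== PORT B =====
-- backward pass of Source B as structural recursion from the right: state = (count of 1s in the
-- suffix seen so far, output built so far)
def altGo : List Int → Int × List Int
  | [] => (0, [])
  | v :: rest =>
    let p := altGo rest
    let c := if v = 1 then p.1 + 1 else p.1
    let w := if c = 0 then v
             else if v = 1 then 1 - PySem.Int.mod c 2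
             else PySem.Int.mod c 2
    (c, w :: p.2)

def solution_alt (a : List Int) : List Int := (altGo a).2

-- ===== PRECONDITION & SPEC =====
def Spec_solution (a : List Int) (out : List Int) : Prop := out = solution_alt a
instance (a : List Int) (out : List Int) : Decidable (Spec_solution a out) := by unfold Spec_solution; infer_instance

-- ===== CLAIM (what is proved, stated in full; the proofs are below) =====
def Claim_equal_solution : Prop := ∀ (a : List Int), Dom_solution a → Spec_solution a (solution a)

-- ===== LEMMAS AND PROOFS =====

-- what one Python pflip 'if x==1: x=0 else: x=1' does to a value
def pflip (v : Int) : Int := if v = 1 then 0 else 1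

-- number of 1s in a list
def cnt (l : List Int) : Nat := l.countP (· = 1)

-- the final value of an element v whose suffix (including itself) holds c ones
def F (v : Int) (c : Nat) : Int :=
  if c = 0 then v else if v = 1 then 1 - ((c % 2 : Nat) : Int) else ((c % 2 : Nat) : Int)

-- the common specification: each element mapped through F with its suffix 1-count
def spec : List Int → List Int
  | [] => []
  | v :: rest => F v (cnt (v :: rest)) :: spec rest

theorem length_spec (l : List Int) : (spec l).length = l.length := by
  induction l with
  | nil => rfl
  | cons v rest ih => simp [spec, ih]

theorem cnt_cons (v : Int) (l : List Int) :
    cnt (v :: l) = (if v = 1 then 1 else 0) + cnt l := by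
  rw [cnt, List.countP_cons]
  by_cases h : v = 1 <;> simp [h, cnt] <;> omega

theorem flip_F (v : Int) (c : Nat) : pflip (F v c) = F v (c + 1) := by
  unfold pflip F
  rcases Nat.eq_zero_or_pos c with hc | hc
  · subst hc; split_ifs <;> simp_all
  · have h2 : c % 2 = 0 ∨ c % 2 = 1 := Nat.mod_two_eq_zero_or_one c
    have h3 : (c + 1) % 2 = 1 - c % 2 := by omega
    rcases h2 with h2 | h2 <;> rw [h2, h3] <;> split_ifs <;> simp_all

theorem spec_append_one (l : List Int) :
    spec (l ++ [1]) = (spec l).map pflip ++ [0] := by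
  induction l with
  | nil => simp [spec, cnt, F]
  | cons v rest ih =>
    have hc : cnt ((v :: rest) ++ [1]) = cnt (v :: rest) + 1 := by
      simp [cnt, List.countP_cons, List.countP_append]
      split_ifs <;> omega
    simp only [List.cons_append, spec, ih, List.map_cons, List.cons_append]
    rw [show (v :: rest) ++ [1] = v :: (rest ++ [1]) from rfl] at hc
    rw [hc, ← flip_F]

theorem spec_append_ne (l : List Int) (x : Int) (hx : x ≠ 1) :
    spec (l ++ [x]) = spec l ++ [x] := by
  induction l with
  | nil => simp [spec, cnt, F, hx]
  | cons v rest ih =>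
    have hc : cnt ((v :: rest) ++ [x]) = cnt (v :: rest) := by
      simp [cnt, List.countP_cons, List.countP_append, hx]
    simp only [List.cons_append, spec, ih, List.cons_append]
    rw [show (v :: rest) ++ [x] = v :: (rest ++ [x]) from rfl] at hc
    rw [hc]

-- ---- B side: altGo computes (count of ones cast to Int, spec) ----
theorem altGo_eq (l : List Int) : altGo l = ((cnt l : Int), spec l) := by
  induction l with
  | nil => simp [altGo, cnt, spec]
  | cons v rest ih =>
    have hmod : ∀ n : Nat, PySem.Int.mod (n : Int) 2 = ((n % 2 : Nat) : Int) := by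
      intro n; exact_mod_cast PySem.Int.mod_natCast n 2
    simp only [altGo, ih, spec]
    rcases eq_or_ne v 1 with hv | hv
    · subst hv
      have hc : cnt (1 :: rest) = cnt rest + 1 := by rw [cnt_cons]; norm_num; omega
      have hne : ((cnt rest : Int)) + 1 ≠ 0 := by
        have := Int.natCast_nonneg (cnt rest); omega
      have hcast : (cnt rest : Int) + 1 = ((cnt rest + 1 : Nat) : Int) := by push_cast; ring
      have hmod' : PySem.Int.mod ((cnt rest : Int) + 1) 2 = (((cnt rest + 1) % 2 : Nat) : Int) := by
        rw [hcast]; exact hmod _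
      rw [hc]
      simp [F, hmod', hne]
    · have hc : cnt (v :: rest) = cnt rest := by rw [cnt_cons]; simp [hv]
      simp only [if_neg hv, hc, F, hmod]
      by_cases h0 : cnt rest = 0
      · simp [h0]
      · simp [h0, hv]

-- ---- A side ----
-- pflip the first m elements
def flipPre : Nat → List Int → List Int
  | 0, l => l
  | _ + 1, [] => []
  | m + 1, v :: rest => pflip v :: flipPre m rest

theorem flipPre_zero (l : List Int) : flipPre 0 l = l := by cases l <;> rfl

theorem flipPre_nil (m : Nat) : flipPre m [] = [] := by cases m <;> rfl

theorem flipPre_getD_ge : ∀ (m j : Nat) (l : List Int) (d : Int), m ≤ j →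
    (flipPre m l).getD j d = l.getD j d := by
  intro m
  induction m with
  | zero => intro j l d _; rw [flipPre_zero]
  | succ m ih =>
    intro j l d h
    cases l with
    | nil => rw [flipPre_nil]
    | cons v rest =>
      cases j with
      | zero => omega
      | succ j => simpa [flipPre] using ih j rest d (by omega)

theorem flipPre_succ : ∀ (m : Nat) (l : List Int), m < l.length →
    flipPre (m + 1) l = (flipPre m l).set m (pflip (l.getD m 0)) := by
  intro m
  induction m with
  | zero =>
    intro l h
    cases l with
    | nil => simp at h
    | cons v rest => simp [flipPre]
  | succ m ih =>
    intro l h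
    cases l with
    | nil => simp at h
    | cons v rest =>
      simp only [flipPre, List.set]
      rw [ih rest (by simpa using h)]
      rfl

theorem flipPre_append (xs : List Int) : ∀ (m : Nat) (ys : List Int), xs.length ≤ m →
    flipPre m (xs ++ ys) = xs.map pflip ++ flipPre (m - xs.length) ys := by
  induction xs with
  | nil => intro m ys _; simp
  | cons v rest ih =>
    intro m ys h
    cases m with
    | zero => simp at h
    | succ m =>
      simp only [List.cons_append, flipPre, List.map_cons, List.length_cons]
      rw [ih m ys (by simpa using h), Nat.succ_sub_succ]

-- one inner pass of A: for j in range(0, m): pflip a[j]   equals   flipPre m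
theorem inner_eq : ∀ (m : Nat) (l : List Int), m ≤ l.length →
    (PySem.List.pyRange 0 (m : Int) 1).foldl (fun acc2 j =>
        if PySem.List.pyGetD acc2 j 0 = 1 then PySem.List.pySetD acc2 j 0
        else PySem.List.pySetD acc2 j 1) l = flipPre m l := by
  intro m
  induction m with
  | zero => intro l _; simp [PySem.List.pyRange_one_eq_nil, flipPre_zero]
  | succ m ih =>
    intro l h
    have hcast : ((m + 1 : Nat) : Int) = (m : Int) + 1 := by push_cast; ring
    rw [hcast, PySem.List.pyRange_one_succ_right (by positivity), List.foldl_append]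
    rw [ih l (by omega)]
    simp only [List.foldl_cons, List.foldl_nil]
    have hget : PySem.List.pyGetD (flipPre m l) (m : Int) 0 = l.getD m 0 := by
      rw [PySem.List.pyGetD_natCast]; exact flipPre_getD_ge m m l 0 le_rfl
    rw [flipPre_succ m l (by omega)]
    simp only [pflip, PySem.List.pySetD_natCast, PySem.List.pyGetD_natCast]
    rw [flipPre_getD_ge m m l 0 le_rfl]
    split_ifs <;> rfl

theorem getD_spec_append_drop (a : List Int) (n : Nat) (h : n < a.length) :
    (spec (a.take n) ++ a.drop n).getD n 0 = a[n] := by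
  have hl : (spec (a.take n)).length = n := by
    rw [length_spec]; simp [Nat.min_eq_left (le_of_lt h)]
  rw [List.getD_eq_getElem?_getD, List.getElem?_append_right (by omega)]
  rw [hl]
  simp [h]

-- the outer loop invariant: after the first n outer iterations the list is
-- spec of the processed prefix followed by the untouched suffix
theorem outer_invariant (a : List Int) : ∀ (n : Nat), n ≤ a.length →
    (PySem.List.pyRange 0 (n : Int) 1).foldl (fun acc i =>
      if PySem.List.pyGetD acc i 0 = 1 then
        (PySem.List.pyRange 0 (i + 1) 1).foldl (fun acc2 j =>
          if PySem.List.pyGetD acc2 j 0 = 1 then PySem.List.pySetD acc2 j 0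
          else PySem.List.pySetD acc2 j 1) acc
      else acc) a = spec (a.take n) ++ a.drop n := by
  intro n
  induction n with
  | zero => intro _; simp [PySem.List.pyRange_one_eq_nil, spec]
  | succ n ih =>
    intro h
    have hn : n < a.length := by omega
    have hcast : ((n + 1 : Nat) : Int) = (n : Int) + 1 := by push_cast; ring
    rw [hcast, PySem.List.pyRange_one_succ_right (by positivity), List.foldl_append]
    rw [ih (by omega)]
    simp only [List.foldl_cons, List.foldl_nil]
    set l' := spec (a.take n) ++ a.drop n with hl'
    have hlen' : l'.length = a.length := by
      rw [hl', List.length_append, length_spec, List.length_take, List.length_drop]; omega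
    have hget : PySem.List.pyGetD l' (n : Int) 0 = a[n] := by
      rw [PySem.List.pyGetD_natCast]; exact getD_spec_append_drop a n hn
    have hspeclen : (spec (a.take n)).length = n := by
      rw [length_spec]; simp [Nat.min_eq_left (le_of_lt hn)]
    have hdrop : a.drop n = a[n] :: a.drop (n + 1) := by
      rw [List.drop_eq_getElem_cons hn]
    have htake : a.take (n + 1) = a.take n ++ [a[n]] := by
      rw [List.take_add_one]; simp [List.getElem?_eq_getElem hn]
    rw [hget]
    by_cases hv : a[n] = 1
    · rw [if_pos hv]
      rw [show ((n : Int) + 1) = ((n + 1 : Nat) : Int) from by push_cast; ring]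
      rw [inner_eq (n + 1) l' (by omega)]
      rw [hl', flipPre_append _ _ _ (by omega), hspeclen]
      have : n + 1 - n = 1 := by omega
      rw [this, hdrop]
      simp only [flipPre]
      rw [htake, hv, spec_append_one]
      simp [pflip]
    · rw [if_neg hv, hl', htake, spec_append_ne _ _ hv, hdrop]
      simp

-- ===== VERDICT (by name: the statement is the Claim_ definition above) =====
theorem solution_spec : Claim_equal_solution := by
  intro a _
  unfold Spec_solution solution solution_alt
  rw [altGo_eq]
  have := outer_invariant a a.length le_rfl
  simp only [List.take_length, List.drop_length, List.append_nil] at this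
  exact this
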